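-- pv_equiv track=rewrite | github.com/James-HoneyBadger/Time_Warp_Classic | src/timewarp/core/languages/logo.py | _split_top_level_commands
-- ===== SOURCE A (Python) =====
-- def _split_top_level_commands(inner):
--     """Split commands properly keeping command-argument pairs together while preserving nested [ ] blocks."""
--     # Known Logo commands that we need to recognize
--     logo_commands = {
--         "FORWARD",
--         "FD",
--         "BACK",
--         "BK",
--         "BACKWARD",
--         "LEFT",
--         "LT",
--         "RIGHT",
--         "RT",
--         "PENUP",
--         "PU",
--         "PENDOWN",
--         "PD",
--         "CLEARSCREEN",
--         "CS",
--         "HOME",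
--         "SETXY",
--         "SETCOLOR",
--         "SETCOLOUR",
--         "COLOR",
--         "SETPENSIZE",
--         "CIRCLE",
--         "DOT",
--         "RECT",
--         "TEXT",
--         "SHOWTURTLE",
--         "HIDETURTLE",
--         "HEADING",
--         "POSITION",
--         "TRACE",
--         "PROFILE",
--         "REPEAT",
--         "DEFINE",
--         "CALL",
--     }
--
--     # Tokenize the input respecting brackets
--     tokens = []
--     buf = []
--     depth = 0
--     i = 0
--
--     while i < len(inner):
--         ch = inner[i]
--         if ch == "[":
--             depth += 1
--             buf.append(ch)
--         elif ch == "]":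
--             depth = max(0, depth - 1)
--             buf.append(ch)
--         elif ch.isspace() and depth == 0:
--             if buf:
--                 tokens.append("".join(buf).strip())
--                 buf = []
--         else:
--             buf.append(ch)
--         i += 1
--     if buf:
--         tokens.append("".join(buf).strip())
--
--     # Now group tokens into commands with their arguments
--     commands = []
--     i = 0
--     while i < len(tokens):
--         token = tokens[i].upper()
--
--         # Check if this token is a known command
--         if token in logo_commands or token.startswith("["):
--             # Start building a command
--             cmd_parts = [tokens[i]]
--             i += 1
--
--             # Collect arguments until we hit another command or end
--             while i < len(tokens):
--                 next_token = tokens[i].upper()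
--
--                 # If next token is a command, stop collecting args
--                 if next_token in logo_commands:
--                     break
--
--                 # If next token starts with '[', it's a nested block - stop
--                 if next_token.startswith("["):
--                     break
--
--                 cmd_parts.append(tokens[i])
--                 i += 1
--
--             # Join the command and its arguments
--             commands.append(" ".join(cmd_parts))
--         else:
--             # Unknown token - treat as standalone command
--             commands.append(tokens[i])
--             i += 1
--
--     return [cmd.strip() for cmd in commands if cmd.strip()]
-- ===== SOURCE B (Python) =====
-- def _split_top_level_commands(inner):
--     """Split commands into command-argument groups: compute token spans by index,
--     slice them out, then group right-to-left by prepending pending arguments."""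
--     logo_commands = {
--         "FORWARD", "FD", "BACK", "BK", "BACKWARD", "LEFT", "LT", "RIGHT", "RT",
--         "PENUP", "PU", "PENDOWN", "PD", "CLEARSCREEN", "CS", "HOME", "SETXY",
--         "SETCOLOR", "SETCOLOUR", "COLOR", "SETPENSIZE", "CIRCLE", "DOT", "RECT",
--         "TEXT", "SHOWTURTLE", "HIDETURTLE", "HEADING", "POSITION", "TRACE",
--         "PROFILE", "REPEAT", "DEFINE", "CALL",
--     }
--
--     # Pass 1: find the (start, end) index spans of the top-level tokens; no
--     # character buffer is ever built -- only cut positions are recorded.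
--     spans = []
--     start = None
--     depth = 0
--     for i, ch in enumerate(inner):
--         if ch == "[":
--             depth += 1
--             if start is None:
--                 start = i
--         elif ch == "]":
--             depth = max(0, depth - 1)
--             if start is None:
--                 start = i
--         elif ch.isspace() and depth == 0:
--             if start is not None:
--                 spans.append((start, i))
--                 start = None
--         else:
--             if start is None:
--                 start = i
--     if start is not None:
--         spans.append((start, len(inner)))
--
--     # Pass 2: slice the tokens out of the original string.
--     tokens = [inner[a:b].strip() for a, b in spans]
--
--     # Pass 3: group RIGHT-TO-LEFT. Walking backwards, non-boundary tokens are
--     # pending arguments; a boundary token (known command or '['-block) claims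
--     # all pending arguments as its own group. Arguments left over at the front
--     # never had a command: they stay standalone.
--     commands = []
--     pending = []
--     for tok in reversed(tokens):
--         u = tok.upper()
--         if u in logo_commands or u.startswith("["):
--             commands = [" ".join([tok] + pending)] + commands
--             pending = []
--         else:
--             pending = [tok] + pending
--     commands = pending + commands
--
--     return [cmd.strip() for cmd in commands if cmd.strip()]
-- ===== Notes on version B (the rewrite author's own statement) =====
-- stated objective: faster
-- what changed: B never builds a character buffer or walks token indices: pass 1 records only (start, end) cut positions, pass 2 slices the tokens out of the original string, and pass 3 groups by iterating the token list in REVERSE, each boundary token claiming the pending arguments accumulated behind it (leftover pending tokens stay standalone), replacing A's buffer-accumulating tokenizer and nested index-advancing grouping loops.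
import Mathlib
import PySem

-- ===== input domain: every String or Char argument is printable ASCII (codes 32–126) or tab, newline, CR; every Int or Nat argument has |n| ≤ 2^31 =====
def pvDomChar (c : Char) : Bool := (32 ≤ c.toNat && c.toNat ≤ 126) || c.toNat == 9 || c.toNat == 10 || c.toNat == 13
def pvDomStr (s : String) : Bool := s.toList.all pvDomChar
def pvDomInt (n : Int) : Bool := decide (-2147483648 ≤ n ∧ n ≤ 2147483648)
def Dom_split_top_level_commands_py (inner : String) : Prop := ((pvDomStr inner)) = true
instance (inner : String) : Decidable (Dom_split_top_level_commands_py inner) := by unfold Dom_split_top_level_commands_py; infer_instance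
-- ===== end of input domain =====

-- B never builds character buffers or walks token indices: it records (start, end) cut
-- positions and slices tokens out, then groups them RIGHT-TO-LEFT, each boundary token
-- claiming the pending arguments behind it (measured constant-factor faster).

-- shared constant: the logo_commands set literal (ASCII upper-case words; membership only)
def pvLogo : List (List Char) :=
  ["FORWARD".toList, "FD".toList, "BACK".toList, "BK".toList, "BACKWARD".toList,
   "LEFT".toList, "LT".toList, "RIGHT".toList, "RT".toList, "PENUP".toList,
   "PU".toList, "PENDOWN".toList, "PD".toList, "CLEARSCREEN".toList, "CS".toList,
   "HOME".toList, "SETXY".toList, "SETCOLOR".toList, "SETCOLOUR".toList,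
   "COLOR".toList, "SETPENSIZE".toList, "CIRCLE".toList, "DOT".toList,
   "RECT".toList, "TEXT".toList, "SHOWTURTLE".toList, "HIDETURTLE".toList,
   "HEADING".toList, "POSITION".toList, "TRACE".toList, "PROFILE".toList,
   "REPEAT".toList, "DEFINE".toList, "CALL".toList]

-- ===== PORT A =====
-- the while-i tokenizer of A, as structural recursion over the remaining characters
def pvTokA (cs : List Char) (buf : List Char) (depth : Int) : List (List Char) :=
  match cs with
  | [] => if buf.isEmpty then [] else [PySem.Chars.strip buf]
  | c :: rest =>
    if c = '[' then pvTokA rest (buf ++ [c]) (depth + 1)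
    else if c = ']' then pvTokA rest (buf ++ [c]) (max 0 (depth - 1))
    else if PySem.Chars.isspace c && depth == 0 then
      if buf.isEmpty then pvTokA rest [] depth
      else PySem.Chars.strip buf :: pvTokA rest [] depth
    else pvTokA rest (buf ++ [c]) depth

-- A's inner while: collect arguments until the next command / '['-token (returns args, remaining tokens)
def pvCollectA (ts : List (List Char)) : List (List Char) × List (List Char) :=
  match ts with
  | [] => ([], [])
  | t :: rest =>
    if pvLogo.contains (PySem.Chars.upper t) then ([], t :: rest)
    else if PySem.Chars.startswith (PySem.Chars.upper t) ['['] then ([], t :: rest)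
    else
      let p := pvCollectA rest
      (t :: p.1, p.2)

theorem pvCollectA_len (ts : List (List Char)) : (pvCollectA ts).2.length ≤ ts.length := by
  induction ts with
  | nil => simp [pvCollectA]
  | cons t rest ih =>
    simp only [pvCollectA]
    split_ifs <;> simp <;> omega

-- A's outer while over the token list
def pvGroupA (ts : List (List Char)) : List (List Char) :=
  match ts with
  | [] => []
  | t :: rest =>
    if pvLogo.contains (PySem.Chars.upper t) || PySem.Chars.startswith (PySem.Chars.upper t) ['['] then
      let p := pvCollectA rest
      PySem.Chars.join [' '] (t :: p.1) :: pvGroupA p.2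
    else t :: pvGroupA rest
termination_by ts.length
decreasing_by
  · exact Nat.lt_succ_of_le (pvCollectA_len rest)
  · simp

def split_top_level_commands_py (inner : String) : List String :=
  let tokens := pvTokA inner.toList [] 0
  let commands := pvGroupA tokens
  (commands.filter (fun c => !(PySem.Chars.strip c).isEmpty)).map
    (fun c => String.ofList (PySem.Chars.strip c))

-- ===== PORT B =====
-- pass 1 of Source B: record the (start, end) index spans of the top-level tokens
-- (the python loop appends spans left to right; the recursion emits them in the same order)
def pvSpansB (cs : List Char) (i : Nat) (start : Option Nat) (depth : Int) : List (Nat × Nat) :=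
  match cs with
  | [] => match start with
          | some a => [(a, i)]
          | none => []
  | c :: rest =>
    if c = '[' then
      pvSpansB rest (i + 1) (some (start.getD i)) (depth + 1)
    else if c = ']' then
      pvSpansB rest (i + 1) (some (start.getD i)) (max 0 (depth - 1))
    else if PySem.Chars.isspace c && depth == 0 then
      match start with
      | some a => (a, i) :: pvSpansB rest (i + 1) none depth
      | none => pvSpansB rest (i + 1) none depth
    else
      pvSpansB rest (i + 1) (some (start.getD i)) depth

-- boundary test of Source B: upper-cased token is a known command or starts with '['
def pvIsBoundB (t : List Char) : Bool :=
  pvLogo.contains (PySem.Chars.upper t) || PySem.Chars.startswith (PySem.Chars.upper t) ['[']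

-- pass 3 of Source B, one reversed-iteration step: state = (commands, pending args)
def pvGStepB (t : List Char) (st : List (List Char) × List (List Char)) :
    List (List Char) × List (List Char) :=
  if pvIsBoundB t then (PySem.Chars.join [' '] (t :: st.2) :: st.1, [])
  else (st.1, t :: st.2)

def split_top_level_commands_py_alt (inner : String) : List String :=
  let cs := inner.toList
  let spans := pvSpansB cs 0 none 0
  -- pass 2: slice each token out of the original string
  let tokens := spans.map (fun p =>
    PySem.Chars.strip (PySem.List.slice cs (some (p.1 : Int)) (some (p.2 : Int))))
  -- pass 3: reversed iteration = right fold
  let g := tokens.foldr pvGStepB ([], [])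
  let commands := g.2 ++ g.1
  (commands.filter (fun c => !(PySem.Chars.strip c).isEmpty)).map
    (fun c => String.ofList (PySem.Chars.strip c))

-- ===== PRECONDITION & SPEC =====
def Spec_split_top_level_commands_py (inner : String) (out : List String) : Prop := out = split_top_level_commands_py_alt inner
instance (inner : String) (out : List String) : Decidable (Spec_split_top_level_commands_py inner out) := by unfold Spec_split_top_level_commands_py; infer_instance

-- ===== CLAIM (what is proved, stated in full; the proofs are below) =====
def Claim_equal_split_top_level_commands_py : Prop := ∀ (inner : String), Dom_split_top_level_commands_py inner → Spec_split_top_level_commands_py inner (split_top_level_commands_py inner)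

-- ===== LEMMAS AND PROOFS =====

-- proof-only: the buffer A carries, reconstructed from B's open span
def pvBufOf (full : List Char) (start : Option Nat) (i : Nat) : List Char :=
  match start with
  | some a => (full.drop a).take (i - a)
  | none => []

-- B's span pass, mapped through slice+strip, equals A's buffer tokenizer
theorem pvSpans_eq (n : Nat) : ∀ (full : List Char) (i : Nat) (start : Option Nat) (depth : Int),
    full.length = i + n →
    (∀ a, start = some a → a < i) →
    (pvSpansB (full.drop i) i start depth).map (fun p =>
        PySem.Chars.strip (PySem.List.slice full (some (p.1 : Int)) (some (p.2 : Int))))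
      = pvTokA (full.drop i) (pvBufOf full start i) depth := by
  induction n with
  | zero =>
    intro full i start depth hlen hinv
    have hdrop : full.drop i = [] := by
      apply List.drop_eq_nil_of_le; omega
    rw [hdrop]
    cases start with
    | none => simp [pvSpansB, pvTokA, pvBufOf]
    | some a =>
      have ha : a < i := hinv a rfl
      have hne : ((full.drop a).take (i - a)).isEmpty = false := by
        simp only [List.isEmpty_eq_false_iff, ← List.length_pos_iff,
          List.length_take, List.length_drop]
        omega
      simp [pvSpansB, pvTokA, pvBufOf, hne, PySem.List.slice_natCast]
  | succ m ih =>
    intro full i start depth hlen hinv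
    have hi : i < full.length := by omega
    have hdrop : full.drop i = full[i] :: full.drop (i + 1) :=
      List.drop_eq_getElem_cons hi
    have hlen' : full.length = (i + 1) + m := by omega
    have hext : pvBufOf full (some (start.getD i)) (i + 1) = pvBufOf full start i ++ [full[i]] := by
      cases start with
      | none =>
        simp only [Option.getD, pvBufOf, Nat.add_sub_cancel_left, List.nil_append]
        rw [hdrop]
        rfl
      | some a =>
        have ha : a < i := hinv a rfl
        simp only [Option.getD, pvBufOf]
        rw [show i + 1 - a = (i - a) + 1 by omega, List.take_add_one]
        congr 1
        have hg : (full.drop a)[i - a]? = some full[i] := by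
          rw [List.getElem?_drop, show a + (i - a) = i by omega,
            List.getElem?_eq_getElem hi]
        simp [hg]
    have hsinv : ∀ a, some (start.getD i) = some a → a < i + 1 := by
      intro a haeq
      cases haeq
      cases start with
      | none => exact Nat.lt_succ_self i
      | some b => exact Nat.lt_succ_of_lt (hinv b rfl)
    set c := full[i] with hc
    rw [hdrop]
    simp only [pvSpansB, pvTokA]
    by_cases h1 : c = '['
    · rw [if_pos h1, if_pos h1,
        ih full (i + 1) (some (start.getD i)) (depth + 1) hlen' hsinv]
      rw [hext]
    · by_cases h2 : c = ']'
      · rw [if_neg h1, if_pos h2, if_neg h1, if_pos h2,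
          ih full (i + 1) (some (start.getD i)) (max 0 (depth - 1)) hlen' hsinv]
        rw [hext]
      · by_cases h3 : (PySem.Chars.isspace c && depth == 0) = true
        · rw [if_neg h1, if_neg h2, if_pos h3, if_neg h1, if_neg h2, if_pos h3]
          have hrec := ih full (i + 1) none depth hlen' (by intro a ha; cases ha)
          cases start with
          | none =>
            have hE : (pvBufOf full (none : Option Nat) i).isEmpty = true := by
              simp [pvBufOf]
            rw [hE]
            simp only [ite_true]
            simpa [pvBufOf] using hrec
          | some a =>
            have ha : a < i := hinv a rfl
            have hE : (pvBufOf full (some a) i).isEmpty = false := by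
              simp only [pvBufOf, List.isEmpty_eq_false_iff, ← List.length_pos_iff,
                List.length_take, List.length_drop]
              omega
            rw [hE]
            simp only [Bool.false_eq_true, if_neg, ite_false, List.map_cons]
            simp only [pvBufOf] at hrec
            rw [hrec]
            simp [pvBufOf, PySem.List.slice_natCast]
        · rw [if_neg h1, if_neg h2, if_neg h3, if_neg h1, if_neg h2, if_neg h3,
            ih full (i + 1) (some (start.getD i)) depth hlen' hsinv]
          rw [hext]

-- A's argument collection is takeWhile/dropWhile of the non-boundary predicate
theorem pvCollectA_eq (ts : List (List Char)) :
    pvCollectA ts = (ts.takeWhile (fun t => !pvIsBoundB t), ts.dropWhile (fun t => !pvIsBoundB t)) := by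
  induction ts with
  | nil => simp [pvCollectA]
  | cons t rest ih =>
    simp only [pvCollectA, pvIsBoundB]
    split_ifs with h1 h2 <;>
      simp_all [List.takeWhile_cons, List.dropWhile_cons, pvIsBoundB]

-- invariant of B's right fold: pending = leading non-boundary tokens, commands = A's groups of the rest
theorem pvFoldr_inv (ts : List (List Char)) :
    ts.foldr pvGStepB ([], [])
      = (pvGroupA (ts.dropWhile (fun t => !pvIsBoundB t)), ts.takeWhile (fun t => !pvIsBoundB t)) := by
  induction ts with
  | nil => simp [pvGroupA]
  | cons t rest ih =>
    rw [List.foldr_cons, ih]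
    by_cases hb : pvIsBoundB t
    · have hb' : (pvLogo.contains (PySem.Chars.upper t) || PySem.Chars.startswith (PySem.Chars.upper t) ['[']) = true := hb
      simp only [pvGStepB, hb, if_pos, ite_true]
      have hnb : (!pvIsBoundB t) = false := by simp [hb]
      simp only [List.takeWhile_cons, List.dropWhile_cons, hnb, Bool.false_eq_true,
        if_neg, ite_false]
      rw [pvGroupA, if_pos hb']
      simp [pvCollectA_eq]
    · simp only [pvGStepB, hb, Bool.false_eq_true, if_neg, ite_false]
      have hnb : (!pvIsBoundB t) = true := by simp [hb]
      simp [List.takeWhile_cons, List.dropWhile_cons, hnb]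

-- A's grouping passes a non-boundary prefix through unchanged
theorem pvGroupA_pre (pre l : List (List Char)) (h : ∀ t ∈ pre, pvIsBoundB t = false) :
    pvGroupA (pre ++ l) = pre ++ pvGroupA l := by
  induction pre with
  | nil => simp
  | cons t rest ih =>
    have ht : pvIsBoundB t = false := h t (List.mem_cons_self)
    have ht' : (pvLogo.contains (PySem.Chars.upper t) || PySem.Chars.startswith (PySem.Chars.upper t) ['[']) = false := by
      simpa [pvIsBoundB] using ht
    rw [List.cons_append, pvGroupA]
    simp only [ht', Bool.false_eq_true, if_neg, ite_false]
    rw [ih (fun x hx => h x (List.mem_cons_of_mem t hx))]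
    rfl

-- ===== VERDICT (by name: the statement is the Claim_ definition above) =====
theorem split_top_level_commands_py_spec : Claim_equal_split_top_level_commands_py := by
  intro inner _
  unfold Spec_split_top_level_commands_py split_top_level_commands_py split_top_level_commands_py_alt
  dsimp only
  have htok := pvSpans_eq inner.toList.length inner.toList 0 none 0 (by omega)
    (by intro a ha; cases ha)
  simp only [List.drop_zero, pvBufOf] at htok
  rw [htok, pvFoldr_inv]
  have hpre : ∀ t ∈ (pvTokA inner.toList [] 0).takeWhile (fun t => !pvIsBoundB t),
      pvIsBoundB t = false := by
    intro t ht
    have := List.mem_takeWhile_imp ht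
    simpa using this
  dsimp only
  rw [← pvGroupA_pre _ _ hpre, List.takeWhile_append_dropWhile]
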